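-- pv_equiv track=rewrite | github.com/Hart-House-Chess-Club/fen-to-image | src/fentoimage/board.py | _flip_fen
-- ===== SOURCE A (Python) =====
-- def _flip_fen(fen) -> str:
--     # get the index of the space
--     space_ind = fen.index(" ")
--     board_lines_fen = fen[0:space_ind]
--
--     # get the board lines fen split up
--     board_lines_fen = board_lines_fen.split("/")
--
--     new_fen = ""
--
--     # read board lines fen backwards for first flip
--     for i in range(len(board_lines_fen) - 1, -1, -1):
--         new_fen += board_lines_fen[i][::-1]
--
--         # if not at the end, add a slash
--         if i != 0:
--             new_fen += "/"
--
--     # add back the active colour, castling, en passant, half moves, full moves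
--     new_fen = new_fen + fen[space_ind:]
--
--     return new_fen
-- ===== SOURCE B (Python) =====
-- def _flip_fen(fen) -> str:
--     # reverse the whole board substring at once: '/' is a single symmetric
--     # separator, so one full reversal equals per-row reversal + row-order reversal
--     space_ind = fen.index(" ")
--     return fen[:space_ind][::-1] + fen[space_ind:]
-- ===== Notes on version B (the rewrite author's own statement) =====
-- stated objective: simpler
-- what changed: Replaces the split-on-'/', reversed-index loop with per-row string reversal and re-join by a single whole-board-substring slice reversal, exact because '/' is a one-character symmetric separator.
import Mathlib
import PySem

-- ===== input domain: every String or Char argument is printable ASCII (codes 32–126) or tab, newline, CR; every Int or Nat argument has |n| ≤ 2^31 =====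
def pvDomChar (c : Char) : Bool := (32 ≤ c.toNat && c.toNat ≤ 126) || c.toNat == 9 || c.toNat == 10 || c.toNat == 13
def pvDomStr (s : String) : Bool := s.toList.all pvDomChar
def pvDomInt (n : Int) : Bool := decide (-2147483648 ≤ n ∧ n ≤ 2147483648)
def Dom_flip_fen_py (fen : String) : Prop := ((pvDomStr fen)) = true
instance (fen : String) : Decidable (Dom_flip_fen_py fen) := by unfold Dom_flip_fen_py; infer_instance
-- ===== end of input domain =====

-- B replaces A's split-on-'/' / reversed-index loop / re-join by a single whole-board slice reversal (simpler).

-- ===== PORT A =====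
def flip_fen_py (fen : String) : String :=
  let s := fen.toList
  let spaceInd : Int := PySem.Chars.find s [' ']          -- fen.index(" "); Pre_ guarantees a space exists
  let boardLinesStr := PySem.List.slice s (some 0) (some spaceInd)   -- fen[0:space_ind]
  let rows := PySem.Chars.splitOn boardLinesStr ['/']     -- .split("/")
  let newFen := (PySem.List.pyRange ((rows.length : Int) - 1) (-1) (-1)).foldl
    (fun acc i =>
      let acc := acc ++ (PySem.List.slice? (PySem.List.pyGetD rows i []) none none (-1)).getD []
      if i ≠ 0 then acc ++ ['/'] else acc) []
  String.ofList (newFen ++ PySem.List.slice s (some spaceInd) none)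

-- ===== PORT B =====
def flip_fen_py_alt (fen : String) : String :=
  let s := fen.toList
  let spaceInd : Int := PySem.Chars.find s [' ']          -- fen.index(" "); Pre_ guarantees a space exists
  String.ofList
    ((PySem.List.slice? (PySem.List.slice s none (some spaceInd)) none none (-1)).getD []
      ++ PySem.List.slice s (some spaceInd) none)

-- ===== PRECONDITION & SPEC =====
-- Pre_ excludes exactly the inputs without a space, on which Python's fen.index(" ") raises ValueError.
def Pre_flip_fen_py (fen : String) : Prop := PySem.Str.isIn " " fen = true
instance (fen : String) : Decidable (Pre_flip_fen_py fen) := by unfold Pre_flip_fen_py; infer_instance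

def pvWitness_flip_fen_py : String := "8/8 w"

def Spec_flip_fen_py (fen : String) (out : String) : Prop := out = flip_fen_py_alt fen
instance (fen : String) (out : String) : Decidable (Spec_flip_fen_py fen out) := by unfold Spec_flip_fen_py; infer_instance

-- ===== CLAIM (what is proved, stated in full; the proofs are below) =====
def Claim_equal_flip_fen_py : Prop := ∀ (fen : String), Dom_flip_fen_py fen → Pre_flip_fen_py fen → Spec_flip_fen_py fen (flip_fen_py fen)

-- ===== LEMMAS AND PROOFS =====

-- intercalate ['/'] over an appended last row
lemma intercalate_concat (xs : List (List Char)) (y : List Char) :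
    List.intercalate ['/'] (xs ++ [y]) =
      if xs = [] then y else List.intercalate ['/'] xs ++ '/' :: y := by
  induction xs with
  | nil => simp [List.intercalate]
  | cons a t ih =>
      cases t with
      | nil => simp [List.intercalate, List.intersperse]
      | cons b t' =>
          have hcc : ∀ (u v : List Char) (w : List (List Char)),
              ['/'].intercalate (u :: v :: w) = u ++ '/' :: ['/'].intercalate (v :: w) := by
            intro u v w
            simp [List.intercalate, List.intersperse]
          simp only [List.cons_append] at ih ⊢
          simp only [hcc, ih]
          simp [List.append_assoc]

lemma intercalate_concat_snoc_char (xs : List (List Char)) (y : List Char) (c : Char) :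
    List.intercalate ['/'] (xs ++ [y ++ [c]]) =
      List.intercalate ['/'] (xs ++ [y]) ++ [c] := by
  rw [intercalate_concat, intercalate_concat]
  by_cases h : xs = [] <;> simp [h]

-- the fuel-based splitOn.go re-joined with '/' gives back the acc, cur and remaining input
lemma go_join (fuel : Nat) (l cur : List Char) (acc : List (List Char))
    (h : l.length < fuel) :
    List.intercalate ['/'] (PySem.Chars.splitOn.go ['/'] fuel l cur acc)
      = List.intercalate ['/'] (acc.reverse ++ [cur.reverse]) ++ l := by
  induction fuel generalizing l cur acc with
  | zero => omega
  | succ f ih =>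
      cases l with
      | nil => simp [PySem.Chars.splitOn.go]
      | cons c rest =>
          by_cases hc : c = '/'
          · subst hc
            have hpre : List.isPrefixOf ['/'] ('/' :: rest) = true := by
              simp [List.isPrefixOf]
            rw [show PySem.Chars.splitOn.go ['/'] (f + 1) ('/' :: rest) cur acc
                  = PySem.Chars.splitOn.go ['/'] f (List.drop 1 ('/' :: rest)) []
                      (cur.reverse :: acc) by
              simp [PySem.Chars.splitOn.go, hpre]]
            have hlen : rest.length < f := by
              simp at h; omega
            rw [List.drop_one, List.tail_cons, ih rest [] (cur.reverse :: acc) hlen]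
            have : (cur.reverse :: acc).reverse ++ [List.reverse []]
                = (acc.reverse ++ [cur.reverse]) ++ [([] : List Char)] := by simp
            rw [this, intercalate_concat]
            simp
          · have hpre : List.isPrefixOf ['/'] (c :: rest) = false := by
              simp [List.isPrefixOf]
              exact fun hh => (hc hh.symm).elim
            rw [show PySem.Chars.splitOn.go ['/'] (f + 1) (c :: rest) cur acc
                  = PySem.Chars.splitOn.go ['/'] f rest (c :: cur) acc by
              simp [PySem.Chars.splitOn.go, hpre]]
            have hlen : rest.length < f := by simp at h; omega
            rw [ih rest (c :: cur) acc hlen]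
            have : (c :: cur).reverse = cur.reverse ++ [c] := by simp
            rw [this, intercalate_concat_snoc_char]
            simp

-- splitOn then re-join with '/' is the identity
lemma join_splitOn (b : List Char) :
    List.intercalate ['/'] (PySem.Chars.splitOn b ['/']) = b := by
  have := go_join (b.length + 1) b [] [] (by omega)
  simpa [PySem.Chars.splitOn, List.intercalate] using this

-- A's reversed-index loop builds the reverse of the re-joined rows
lemma loop_eq (rows : List (List Char)) (init : List Char) :
    (PySem.List.pyRange ((rows.length : Int) - 1) (-1) (-1)).foldl
      (fun acc i =>
        let acc := acc ++ (PySem.List.slice? (PySem.List.pyGetD rows i []) none none (-1)).getD []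
        if i ≠ 0 then acc ++ ['/'] else acc) init
    = init ++ (List.intercalate ['/'] rows).reverse := by
  induction rows using List.reverseRecOn generalizing init with
  | nil =>
      rw [PySem.List.pyRange_neg_one_eq_nil (by norm_num)]
      simp [List.intercalate]
  | append_singleton rows x ih =>
      have h1 : (((rows ++ [x]).length : Int) - 1) = (rows.length : Int) := by
        simp
      rw [h1, PySem.List.pyRange_neg_one_cons (show (-1 : Int) < (rows.length : Int) by omega)]
      have hget : PySem.List.pyGetD (rows ++ [x]) ((rows.length : Nat) : Int) [] = x := by
        rw [PySem.List.pyGetD_natCast]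
        simp [List.getD]
      have hcong : ∀ (acc0 : List Char),
          List.foldl
            (fun acc i =>
              let acc := acc ++ (PySem.List.slice? (PySem.List.pyGetD (rows ++ [x]) i []) none none (-1)).getD []
              if i ≠ 0 then acc ++ ['/'] else acc)
            acc0 (PySem.List.pyRange ((rows.length : Int) - 1) (-1) (-1))
          = acc0 ++ (List.intercalate ['/'] rows).reverse := by
        intro acc0
        rw [PySem.List.foldl_congr_mem _ _
          (fun acc i =>
            let acc := acc ++ (PySem.List.slice? (PySem.List.pyGetD rows i []) none none (-1)).getD []
            if i ≠ 0 then acc ++ ['/'] else acc) _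
          (by
            intro acc i hi
            rw [PySem.List.mem_pyRange_neg_one] at hi
            have h0 : 0 ≤ i := by omega
            have h2 : i < (rows.length : Int) := by omega
            have hg : PySem.List.pyGetD (rows ++ [x]) i [] = PySem.List.pyGetD rows i [] := by
              rw [PySem.List.pyGetD_eq_getElem _ [] h0 (by simp; omega),
                  PySem.List.pyGetD_eq_getElem _ [] h0 (by exact_mod_cast h2)]
              exact List.getElem_append_left (by omega)
            simp only [hg])]
        exact ih acc0
      rw [List.foldl_cons, hcong]
      simp only [hget, PySem.List.slice?_none_none_neg_one, Option.getD_some]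
      rw [intercalate_concat]
      by_cases hrows : rows = []
      · subst hrows
        simp [List.intercalate]
      · have hne : ((rows.length : Nat) : Int) ≠ 0 := by
          simpa using fun h => hrows (List.length_eq_zero_iff.mp h)
        rw [if_pos hne, if_neg hrows]
        simp [List.append_assoc]

-- ===== VERDICT (by name: the statement is the Claim_ definition above) =====
theorem flip_fen_py_spec : Claim_equal_flip_fen_py := by
  intro fen _ hpre
  show flip_fen_py fen = flip_fen_py_alt fen
  have hsp : [' '] <:+: fen.toList := by
    have h := (PySem.Str.isIn_iff_infix " " fen).mp hpre
    simpa using h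
  have hfind : 0 ≤ PySem.Chars.find fen.toList [' '] :=
    (PySem.Chars.find_nonneg_iff _ _).mpr hsp
  unfold flip_fen_py flip_fen_py_alt
  dsimp only
  rw [PySem.List.slice_zero_start, PySem.List.slice_to _ hfind,
      PySem.List.slice?_none_none_neg_one, loop_eq, join_splitOn]
  simp
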